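-- pv_equiv track=rewrite | github.com/DerBiasto/aoc | 2021/03_binary_diagnostic/aoc202103.py | part1
-- ===== SOURCE A (Python) =====
-- InputType = tuple[int, list[int]]
--
-- OutputType = int
--
-- def part1(data: InputType) -> OutputType:
--     """Solve part 1."""
--     gamma = epsilon = 0
--     half_n = len(data[1]) // 2
--     for i in reversed(range(data[0])):
--         count0 = count1 = 0
--         mask = 1 << i
--         for num in data[1]:
--             if num & mask:
--                 count1 += 1
--             else:
--                 count0 += 1
--         if count1 >= half_n:
--             gamma += 2 ** i
--         elif count0 > half_n:
--             epsilon += 2 ** i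
--     return gamma * epsilon
-- ===== SOURCE B (Python) =====
-- def part1(data):
--     """Solve part 1: build the per-bit set-bit count table in one pass, then score bits."""
--     bits, nums = data
--     n = len(nums)
--     counts = [0] * bits
--     for num in nums:
--         counts = [c + ((num >> i) & 1) for i, c in enumerate(counts)]
--     half_n = n // 2
--     gamma = epsilon = 0
--     for i, count1 in reversed(list(enumerate(counts))):
--         if count1 >= half_n:
--             gamma += 2 ** i
--         elif n - count1 > half_n:
--             epsilon += 2 ** i
--     return gamma * epsilon
-- ===== Notes on version B (the rewrite author's own statement) =====
-- stated objective: alternative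
-- what changed: B accumulates a per-bit set-bit count table in a single pass over the numbers (updating all positions per number) and then scores gamma/epsilon from the table, instead of A's rescan of the whole number list once per bit position.
import Mathlib
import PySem

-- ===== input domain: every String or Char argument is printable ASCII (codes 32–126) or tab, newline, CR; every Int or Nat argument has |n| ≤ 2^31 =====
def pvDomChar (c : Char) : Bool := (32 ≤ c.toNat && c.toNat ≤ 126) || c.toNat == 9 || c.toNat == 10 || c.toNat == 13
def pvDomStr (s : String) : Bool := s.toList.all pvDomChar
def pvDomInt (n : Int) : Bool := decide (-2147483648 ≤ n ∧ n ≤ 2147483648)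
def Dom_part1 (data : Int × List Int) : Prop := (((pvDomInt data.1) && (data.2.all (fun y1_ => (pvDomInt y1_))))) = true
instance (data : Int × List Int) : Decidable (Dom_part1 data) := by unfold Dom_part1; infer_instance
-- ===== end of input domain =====

-- B replaces A's per-bit rescans of the number list by one per-bit counts table accumulated
-- in a single pass over the numbers, then scores each bit from the table (objective: alternative).

-- ===== PORT A =====
def part1 (data : Int × List Int) : Int :=
  -- gamma = epsilon = 0; half_n = len(data[1]) // 2
  let half_n : Int := PySem.Int.floordiv (data.2.length : Int) 2
  -- for i in reversed(range(data[0])): count bit i over data[1], then the threshold tests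
  let ge : Int × Int :=
    ((PySem.List.pyRange 0 data.1 1).reverse).foldl (fun (ge : Int × Int) i =>
      -- mask = 1 << i  (i ≥ 0 for every element of range(data[0]), so .toNat is exact)
      let mask : Int := 1 <<< i.toNat
      let c : Int × Int := data.2.foldl (fun (c : Int × Int) num =>
          if PySem.Int.band num mask ≠ 0 then (c.1, c.2 + 1) else (c.1 + 1, c.2)) (0, 0)
      if c.2 ≥ half_n then (ge.1 + 2 ^ i.toNat, ge.2)
      else if c.1 > half_n then (ge.1, ge.2 + 2 ^ i.toNat)
      else ge) (0, 0)
  ge.1 * ge.2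

-- ===== PORT B =====
-- counts = [c + ((num >> i) & 1) for i, c in enumerate(counts)]  (loop body of B's first pass)
def pvUpd (counts : List Int) (num : Int) : List Int :=
  (PySem.List.enumerate counts).map (fun ic => ic.2 + PySem.Int.band (num >>> ic.1.toNat) 1)

def part1_alt (data : Int × List Int) : Int :=
  let bits := data.1
  let nums := data.2
  let n : Int := (nums.length : Int)
  -- counts = [0] * bits  (empty when bits ≤ 0, exactly as in Python)
  let counts0 : List Int := List.replicate bits.toNat 0
  -- for num in nums: counts = pvUpd counts num   (one pass over the numbers)
  let counts : List Int := nums.foldl pvUpd counts0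
  let half_n : Int := PySem.Int.floordiv n 2
  -- for i, count1 in reversed(list(enumerate(counts))): threshold tests
  let ge : Int × Int :=
    ((PySem.List.enumerate counts).reverse).foldl (fun (ge : Int × Int) ic =>
      if ic.2 ≥ half_n then (ge.1 + 2 ^ ic.1.toNat, ge.2)
      else if n - ic.2 > half_n then (ge.1, ge.2 + 2 ^ ic.1.toNat)
      else ge) (0, 0)
  ge.1 * ge.2

-- ===== PRECONDITION & SPEC =====
def Spec_part1 (data : Int × List Int) (out : Int) : Prop := out = part1_alt data
instance (data : Int × List Int) (out : Int) : Decidable (Spec_part1 data out) := by unfold Spec_part1; infer_instance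

-- ===== CLAIM (what is proved, stated in full; the proofs are below) =====
def Claim_equal_part1 : Prop := ∀ (data : Int × List Int), Dom_part1 data → Spec_part1 data (part1 data)

-- ===== LEMMAS AND PROOFS =====

-- bit j of num, as B extracts it
def pvBit (num : Int) (j : Nat) : Int := PySem.Int.band (num >>> j) 1

-- number of elements of nums having bit j set
def pvCnt (nums : List Int) (j : Nat) : Int := (nums.map (fun num => pvBit num j)).sum

-- Python's num & (1 << j), on a negative num, via the two's-complement branch of band
lemma pvBand_negSucc (k b : Nat) :
    PySem.Int.band (Int.negSucc k) ((b:Nat):Int) = ((b - (b &&& k) : Nat) : Int) := by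
  rw [Int.negSucc_eq, PySem.Int.band, if_neg (by omega), if_pos (by omega)]
  have e2 : (-(-((k:Int)+1)) - 1).toNat = k := by simp
  rw [Int.toNat_natCast, e2]

-- B's bit extraction agrees with A's mask test
lemma pvBit_if (num : Int) (j : Nat) :
    pvBit num j = if PySem.Int.band num (((1 <<< j : Nat) : Int)) = 0 then 0 else 1 := by
  have h2 : (((1 <<< j : Nat) : Int)) = ((2^j : Nat) : Int) := by
    rw [Nat.one_shiftLeft]
  rw [pvBit, h2]
  rcases num with n | m
  · have h1 : ((Int.ofNat n) >>> j) = ((n >>> j : Nat) : Int) := rfl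
    rw [h1, show (1:Int) = ((1:Nat) : Int) from rfl]
    simp only [PySem.Int.band_natCast, Int.ofNat_eq_natCast]
    rw [Nat.and_one_is_mod, Nat.and_two_pow, Nat.shiftRight_eq_div_pow,
      Nat.testBit_eq_decide_div_mod_eq]
    rcases Nat.mod_two_eq_zero_or_one (n / 2^j) with h | h <;> simp [h]
  · have h1 : (Int.negSucc m) >>> j = Int.negSucc (m >>> j) := rfl
    rw [h1, show (1:Int) = ((1:Nat) : Int) from rfl, pvBand_negSucc, pvBand_negSucc,
      Nat.and_comm 1, Nat.and_one_is_mod, Nat.and_comm, Nat.and_two_pow,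
      Nat.shiftRight_eq_div_pow, Nat.testBit_eq_decide_div_mod_eq]
    have hp : 0 < 2^j := Nat.two_pow_pos j
    rcases Nat.mod_two_eq_zero_or_one (m / 2^j) with h | h <;> simp [h]

-- A's inner counting loop, characterised by pvCnt
lemma pvInner (nums : List Int) (j : Nat) (a b : Int) :
    nums.foldl (fun (c : Int × Int) num =>
        if PySem.Int.band num (((1 <<< j : Nat) : Int)) ≠ 0 then (c.1, c.2 + 1) else (c.1 + 1, c.2)) (a, b)
    = (a + ((nums.length : Int) - pvCnt nums j), b + pvCnt nums j) := by
  induction nums generalizing a b with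
  | nil => simp [pvCnt]
  | cons num rest ih =>
    rw [List.foldl_cons]
    by_cases h : PySem.Int.band num (((1 <<< j : Nat) : Int)) = 0
    · have hb : pvBit num j = 0 := by rw [pvBit_if, if_pos h]
      rw [if_neg (by simpa using h), ih]
      simp only [pvCnt, List.map_cons, List.sum_cons, List.length_cons, hb]
      refine Prod.ext ?_ ?_ <;> (push_cast; ring)
    · have hb : pvBit num j = 1 := by rw [pvBit_if, if_neg h]
      rw [if_pos (by simpa using h), ih]
      simp only [pvCnt, List.map_cons, List.sum_cons, List.length_cons, hb]
      refine Prod.ext ?_ ?_ <;> (push_cast; ring)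

-- one step of B's table update, on a table of the canonical shape
lemma pvStep (m : Nat) (f : Nat → Int) (num : Int) :
    pvUpd ((List.range m).map f) num = (List.range m).map (fun j => f j + pvBit num j) := by
  apply List.ext_getElem
  · simp [pvUpd, PySem.List.length_enumerate]
  · intro k h1 h2
    simp [pvUpd, PySem.List.getElem_enumerate, pvBit, Int.shiftRight_natCast_right]

-- B's whole one-pass table fold, characterised
lemma pvCounts (nums : List Int) (m : Nat) (f : Nat → Int) :
    nums.foldl pvUpd ((List.range m).map f)
    = (List.range m).map (fun j => f j + pvCnt nums j) := by
  induction nums generalizing f with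
  | nil => simp [pvCnt]
  | cons num rest ih =>
    rw [List.foldl_cons, pvStep, ih]
    apply List.map_congr_left
    intro j _
    simp only [pvCnt, List.map_cons, List.sum_cons]
    ring

-- enumerate of a canonical table
lemma pvEnum (m : Nat) (g : Nat → Int) :
    PySem.List.enumerate ((List.range m).map g)
    = (List.range m).map (fun (j : Nat) => ((j : Int), g j)) := by
  apply List.ext_getElem
  · simp [PySem.List.length_enumerate]
  · intro k h1 h2
    simp [PySem.List.getElem_enumerate]

-- the pointwise body of A's outer loop equals the pointwise body of B's scoring loop
lemma pvPoint (nums : List Int) (j : Nat) (acc : Int × Int) :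
    (if (List.foldl (fun (c : Int × Int) num =>
            if PySem.Int.band num (((1 <<< j : Nat) : Int)) ≠ 0 then (c.1, c.2 + 1) else (c.1 + 1, c.2))
            ((0:Int), (0:Int)) nums).2 ≥ PySem.Int.floordiv ((nums.length : Nat) : Int) 2 then
       (acc.1 + 2 ^ j, acc.2)
     else if (List.foldl (fun (c : Int × Int) num =>
            if PySem.Int.band num (((1 <<< j : Nat) : Int)) ≠ 0 then (c.1, c.2 + 1) else (c.1 + 1, c.2))
            ((0:Int), (0:Int)) nums).1 > PySem.Int.floordiv ((nums.length : Nat) : Int) 2 then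
       (acc.1, acc.2 + 2 ^ j)
     else acc)
    = (if pvCnt nums j ≥ PySem.Int.floordiv ((nums.length : Nat) : Int) 2 then
         (acc.1 + 2 ^ j, acc.2)
       else if ((nums.length : Nat) : Int) - pvCnt nums j > PySem.Int.floordiv ((nums.length : Nat) : Int) 2 then
         (acc.1, acc.2 + 2 ^ j)
       else acc) := by
  rw [pvInner nums j 0 0]
  simp only [zero_add]

-- ===== VERDICT (by name: the statement is the Claim_ definition above) =====
theorem part1_spec : Claim_equal_part1 := by
  intro data _
  show part1 data = part1_alt data
  obtain ⟨bits, nums⟩ := data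
  simp only [part1, part1_alt]
  have hrep : List.replicate bits.toNat (0:Int) = (List.range bits.toNat).map (fun _ => (0:Int)) := by
    simp
  rw [hrep, pvCounts]
  simp only [zero_add]
  rw [pvEnum, PySem.List.pyRange_zero, ← List.map_reverse, ← List.map_reverse,
    List.foldl_map, List.foldl_map]
  refine congrArg (fun p : Int × Int => p.1 * p.2)
    (PySem.List.foldl_congr_mem _ _ _ _ ?_)
  intro acc j hj
  exact pvPoint nums j acc
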